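-- pv_equiv track=rewrite | github.com/Kolo-Naukowe-Data-Science-PW/Rekrutacja_2022 | zadanie_programistyczne/dijkstra_based.py | next_letter
-- ===== SOURCE A (Python) =====
-- def next_letter(table, unvisited):
--     copy_table = table.copy()
--     for element in table:           #checks if the letter is unvisited
--         if element not in unvisited:
--             del copy_table[element]
--
--     for x in table:        #cheks which letter from unvisited has the shortest path.
--         if x in unvisited:
--             if table[x][0] == copy_table[min(copy_table, key=lambda x: table[x][0])][0]:
--                 return x
-- ===== SOURCE B (Python) =====
-- def next_letter(table, unvisited):
--     best_letter = None
--     best_cost = None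
--     for letter, costs in table.items():
--         if letter in unvisited:
--             c = costs[0]
--             if best_letter is None or c < best_cost:
--                 best_letter = letter
--                 best_cost = c
--     return best_letter
-- ===== Notes on version B (the rewrite author's own statement) =====
-- stated objective: simpler
-- what changed: B replaces A's copy-then-delete filtered dict, min-with-key over it (recomputed inside the scanning loop) and the second equality-scan by one single running-argmin pass with strict < for first-wins tie-breaking.
-- outside the precondition, e.g. on next_letter({'a': [1]}, []): A returns None, B returns None
import Mathlib
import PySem

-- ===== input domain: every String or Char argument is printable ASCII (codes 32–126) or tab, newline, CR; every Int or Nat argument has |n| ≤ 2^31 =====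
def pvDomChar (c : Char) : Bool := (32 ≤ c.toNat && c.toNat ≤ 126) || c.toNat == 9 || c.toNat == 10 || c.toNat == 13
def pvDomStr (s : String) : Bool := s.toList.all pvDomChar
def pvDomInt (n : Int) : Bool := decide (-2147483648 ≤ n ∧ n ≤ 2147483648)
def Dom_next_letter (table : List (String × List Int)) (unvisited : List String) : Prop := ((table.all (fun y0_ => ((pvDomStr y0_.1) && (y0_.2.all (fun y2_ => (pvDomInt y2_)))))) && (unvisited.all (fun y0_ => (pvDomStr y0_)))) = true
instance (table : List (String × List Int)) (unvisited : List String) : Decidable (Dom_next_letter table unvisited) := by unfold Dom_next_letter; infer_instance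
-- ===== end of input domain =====

-- B replaces A's copy-delete filtered dict + min-with-key + rescanning loop by one running-argmin pass (objective: simpler).

-- ===== PORT A =====
-- table[x][0] ported in the total form getD/getD 0: at every use site of A the key is present and the list nonempty (Pre_).
def pvCostT (table : List (String × List Int)) (x : String) : Int :=
  (PySem.List.pyGet? (PySem.Dict.getD (PySem.Dict.mk table) x []) 0).getD 0

def next_letter (table : List (String × List Int)) (unvisited : List String) : String :=
  let t := PySem.Dict.mk table
  -- copy_table = table.copy(); for element in table: if element not in unvisited: del copy_table[element]
  let copy_table := (PySem.Dict.keys t).foldl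
    (fun ct element => if element ∈ unvisited then ct else PySem.Dict.erase ct element) t
  -- for x in table: if x in unvisited: if table[x][0] == copy_table[min(copy_table, key=...)][0]: return x
  (((PySem.Dict.keys t).find? (fun x =>
      decide (x ∈ unvisited) &&
      (match PySem.List.min? (PySem.Dict.keys copy_table) (fun y => pvCostT table y) with
       | none => false      -- Python: min() raises ValueError here; unreachable under Pre_
       | some m => decide (pvCostT table x
            = (PySem.List.pyGet? (PySem.Dict.getD copy_table m []) 0).getD 0)))).getD "")
  -- falling off the loop returns None in Python (not a str); excluded by Pre_

-- ===== PORT B =====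
def next_letter_alt (table : List (String × List Int)) (unvisited : List String) : String :=
  let best := table.foldl
    (fun best p =>
      if p.1 ∈ unvisited then
        let c := (PySem.List.pyGet? p.2 0).getD 0
        match best with
        | none => some (p.1, c)
        | some q => if c < q.2 then some (p.1, c) else some q
      else best)
    (none : Option (String × Int))
  match best with
  | some q => q.1
  | none => ""      -- Python returns None (not a str); excluded by Pre_

-- ===== PRECONDITION & SPEC =====
-- Pre_ excludes: association lists with duplicate keys (not representable as a Python dict input); inputs where no
-- table key is in unvisited (A returns None, which is not a str); and inputs where some unvisited table key has an
-- empty cost list (A raises IndexError).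
def Pre_next_letter (table : List (String × List Int)) (unvisited : List String) : Prop :=
  (table.map Prod.fst).Nodup ∧ (∃ p ∈ table, p.1 ∈ unvisited) ∧ (∀ p ∈ table, p.1 ∈ unvisited → p.2 ≠ [])
instance (table : List (String × List Int)) (unvisited : List String) : Decidable (Pre_next_letter table unvisited) := by unfold Pre_next_letter; infer_instance

def pvWitness_next_letter : (List (String × List Int)) × List String := ([("a", [2]), ("b", [1])], ["a", "b"])

def Spec_next_letter (table : List (String × List Int)) (unvisited : List String) (out : String) : Prop := out = next_letter_alt table unvisited
instance (table : List (String × List Int)) (unvisited : List String) (out : String) : Decidable (Spec_next_letter table unvisited out) := by unfold Spec_next_letter; infer_instance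

-- ===== CLAIM (what is proved, stated in full; the proofs are below) =====
def Claim_equal_next_letter : Prop := ∀ (table : List (String × List Int)) (unvisited : List String), Dom_next_letter table unvisited → Pre_next_letter table unvisited → Spec_next_letter table unvisited (next_letter table unvisited)

-- ===== LEMMAS AND PROOFS =====

-- the cost of a table row, as B reads it directly from the pair
def pvCost (p : String × List Int) : Int := (PySem.List.pyGet? p.2 0).getD 0

-- min?'s left fold started at `some a`: the result is `a` itself, or a list element strictly below `a`
-- and strictly below everything before it.
theorem pv_minfold_first {α : Type} (key : α → Int) :
    ∀ (l : List α) (a m : α),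
      l.foldl (fun acc x => match acc with
        | none => some x
        | some b => if key x < key b then some x else some b) (some a) = some m →
      m = a ∨ ∃ l₁ l₂, l = l₁ ++ m :: l₂ ∧ key m < key a ∧ ∀ y ∈ l₁, key m < key y := by
  intro l
  induction l with
  | nil => intro a m h; simp only [List.foldl_nil, Option.some.injEq] at h; exact Or.inl h.symm
  | cons x xs ih =>
    intro a m h
    simp only [List.foldl_cons] at h
    by_cases hx : key x < key a
    · rw [if_pos hx] at h
      rcases ih x m h with rfl | ⟨l₁, l₂, rfl, hlt, hpre⟩
      · exact Or.inr ⟨[], xs, rfl, hx, by simp⟩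
      · refine Or.inr ⟨x :: l₁, l₂, rfl, lt_trans hlt hx, ?_⟩
        intro y hy
        rcases List.mem_cons.mp hy with rfl | hy
        · exact hlt
        · exact hpre y hy
    · rw [if_neg hx] at h
      rcases ih a m h with rfl | ⟨l₁, l₂, rfl, hlt, hpre⟩
      · exact Or.inl rfl
      · refine Or.inr ⟨x :: l₁, l₂, rfl, hlt, ?_⟩
        intro y hy
        rcases List.mem_cons.mp hy with rfl | hy
        · exact lt_of_lt_of_le hlt (not_lt.mp hx)
        · exact hpre y hy

-- min? returns the FIRST element attaining the minimum: everything before it is strictly larger.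
theorem pv_min?_first {α : Type} (key : α → Int) (l : List α) (m : α)
    (h : PySem.List.min? l key = some m) :
    ∃ l₁ l₂, l = l₁ ++ m :: l₂ ∧ ∀ y ∈ l₁, key m < key y := by
  cases l with
  | nil => simp [PySem.List.min?] at h
  | cons x xs =>
    simp only [PySem.List.min?, List.foldl_cons] at h
    rcases pv_minfold_first key xs x m h with rfl | ⟨l₁, l₂, rfl, hlt, hpre⟩
    · exact ⟨[], xs, rfl, by simp⟩
    · refine ⟨x :: l₁, l₂, rfl, ?_⟩
      intro y hy
      rcases List.mem_cons.mp hy with rfl | hy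
      · exact hlt
      · exact hpre y hy

theorem pv_find?_of_first {α : Type} (key : α → Int) (l₁ l₂ : List α) (m : α)
    (h : ∀ y ∈ l₁, key m < key y) :
    (l₁ ++ m :: l₂).find? (fun p => decide (key p = key m)) = some m := by
  induction l₁ with
  | nil => simp
  | cons y ys ih =>
    have hy : key m < key y := h y (List.mem_cons_self ..)
    have : (decide (key y = key m)) = false := by simp; omega
    simp only [List.cons_append, List.find?_cons, this]
    exact ih (fun z hz => h z (List.mem_cons_of_mem _ hz))

-- min? commutes with map.
theorem pv_min?_map {α β : Type} (f : α → β) (key : β → Int) (l : List α) :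
    PySem.List.min? (l.map f) key = (PySem.List.min? l (fun x => key (f x))).map f := by
  simp only [PySem.List.min?, List.foldl_map]
  suffices h : ∀ (acc : Option α),
      l.foldl (fun a x => match a with
        | none => some (f x)
        | some b => if key (f x) < key b then some (f x) else some b) (acc.map f)
      = (l.foldl (fun a x => match a with
        | none => some x
        | some b => if key (f x) < key (f b) then some x else some b) acc).map f by
    simpa using h none
  induction l with
  | nil => intro acc; simp
  | cons x xs ih =>
    intro acc
    simp only [List.foldl_cons]
    cases acc with
    | none => simpa using ih (some x)
    | some b =>
      by_cases hb : key (f x) < key (f b)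
      · simp only [Option.map_some, if_pos hb]; exact ih (some x)
      · simp only [Option.map_some, if_neg hb]; exact ih (some b)

-- find? depends on the predicate only through its values on the list.
theorem pv_find?_congr {α : Type} (p q : α → Bool) (l : List α)
    (h : ∀ x ∈ l, p x = q x) : l.find? p = l.find? q := by
  induction l with
  | nil => rfl
  | cons x xs ih =>
    have hx := h x (List.mem_cons_self ..)
    simp only [List.find?_cons, hx]
    cases q x with
    | true => rfl
    | false => exact ih (fun y hy => h y (List.mem_cons_of_mem _ hy))

-- min? depends on the key only through its values on the list.
theorem pv_min?_congr {α : Type} (k1 k2 : α → Int) (l : List α)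
    (h : ∀ x ∈ l, k1 x = k2 x) :
    PySem.List.min? l k1 = PySem.List.min? l k2 := by
  cases l with
  | nil => rfl
  | cons x xs =>
    simp only [PySem.List.min?, List.foldl_cons]
    have hx := h x (List.mem_cons_self ..)
    have hxs : ∀ y ∈ xs, k1 y = k2 y := fun y hy => h y (List.mem_cons_of_mem _ hy)
    clear h
    induction xs generalizing x with
    | nil => rfl
    | cons y ys ih =>
      have hy := hxs y (List.mem_cons_self ..)
      have hys : ∀ z ∈ ys, k1 z = k2 z := fun z hz => hxs z (List.mem_cons_of_mem _ hz)
      simp only [List.foldl_cons, hy, hx]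
      by_cases hlt : k2 y < k2 x
      · simp only [if_pos hlt]; exact ih y hy hys
      · simp only [if_neg hlt]; exact ih x hx hys

-- B's fold step, named so every lemma speaks about one and the same function
def pvStepB (best : Option (String × Int)) (p : String × List Int) : Option (String × Int) :=
  match best with
  | none => some (p.1, pvCost p)
  | some q => if pvCost p < q.2 then some (p.1, pvCost p) else some q

-- B's running-argmin fold over candidate pairs is min? tagged with (letter, cost).
theorem pv_foldB (l : List (String × List Int)) :
    ∀ (a : String × List Int),
      l.foldl pvStepB (some (a.1, pvCost a))
      = (PySem.List.min? (a :: l) pvCost).map (fun p => (p.1, pvCost p)) := by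
  induction l with
  | nil => intro a; simp [PySem.List.min?]
  | cons x xs ih =>
    intro a
    have hmincons : PySem.List.min? (a :: x :: xs) pvCost
        = PySem.List.min? ((if pvCost x < pvCost a then x else a) :: xs) pvCost := by
      by_cases h : pvCost x < pvCost a
      · simp [PySem.List.min?, h]
      · simp [PySem.List.min?, h]
    rw [List.foldl_cons, hmincons]
    by_cases h : pvCost x < pvCost a
    · simp only [pvStepB, if_pos h]
      exact ih x
    · simp only [pvStepB, if_neg h]
      exact ih a

theorem pv_foldB_none (l : List (String × List Int)) :
    l.foldl pvStepB none = (PySem.List.min? l pvCost).map (fun p => (p.1, pvCost p)) := by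
  cases l with
  | nil => rfl
  | cons x xs =>
    rw [List.foldl_cons]
    have : pvStepB none x = some (x.1, pvCost x) := rfl
    rw [this, pv_foldB xs x]

-- A's delete loop: the surviving items are those whose key is in unvisited or was never offered for deletion.
theorem pv_items_foldl_erase (unvisited : List String) :
    ∀ (ks : List String) (d : PySem.Dict String (List Int)),
      (ks.foldl (fun ct e => if e ∈ unvisited then ct else PySem.Dict.erase ct e) d).items
      = d.items.filter (fun p => decide (p.1 ∈ unvisited) || !decide (p.1 ∈ ks)) := by
  intro ks
  induction ks with
  | nil => intro d; simp
  | cons e ks ih =>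
    intro d
    simp only [List.foldl_cons]
    by_cases he : e ∈ unvisited
    · rw [if_pos he, ih]
      apply List.filter_congr
      intro p _
      by_cases hpu : p.1 ∈ unvisited
      · simp [hpu]
      · have hpe : p.1 ≠ e := fun h => hpu (h ▸ he)
        simp [hpu, hpe]
    · rw [if_neg he, ih]
      show (PySem.Dict.erase d e).items.filter _ = _
      simp only [PySem.Dict.erase, List.filter_filter]
      apply List.filter_congr
      intro p _
      by_cases hpe : p.1 = e
      · subst hpe
        simp [he]
      · simp [hpe]

-- ===== VERDICT (by name: the statement is the Claim_ definition above) =====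
set_option maxHeartbeats 1000000 in
theorem next_letter_spec : Claim_equal_next_letter := by
  intro table unvisited _ hpre
  obtain ⟨hnd, hex, -⟩ := hpre
  unfold Spec_next_letter next_letter next_letter_alt
  -- the candidate rows, in table order
  set cand := table.filter (fun p => decide (p.1 ∈ unvisited)) with hcand
  have hkeys : (PySem.Dict.mk table).keys = table.map Prod.fst := rfl
  have hitems : (PySem.Dict.mk table).items = table := rfl
  -- cand is nonempty, so min? over it returns some first minimum p₀
  have hcand_ne : cand ≠ [] := by
    obtain ⟨p, hp, hpu⟩ := hex
    intro h
    have : p ∈ cand := List.mem_filter.mpr ⟨hp, by simpa using hpu⟩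
    simp [h] at this
  obtain ⟨p₀, hmin⟩ : ∃ p₀, PySem.List.min? cand pvCost = some p₀ := by
    cases hm : PySem.List.min? cand pvCost with
    | none => exact absurd ((PySem.List.min?_eq_none_iff _ _).mp hm) hcand_ne
    | some p₀ => exact ⟨p₀, rfl⟩
  have hp₀_cand : p₀ ∈ cand := PySem.List.min?_mem hmin
  have hp₀_tab : p₀ ∈ table := List.mem_of_mem_filter hp₀_cand
  -- lookups in table agree with the row itself (keys are unique)
  have hlook : ∀ p ∈ table, pvCostT table p.1 = pvCost p := by
    intro p hp
    have := PySem.Dict.getD_of_mem_items (PySem.Dict.mk table) (k := p.1) (v := p.2)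
      (by simpa [hitems] using hp) (by simpa [PySem.Dict.keys, hitems] using hnd) []
    simp [pvCostT, pvCost, this]
  -- the delete loop leaves exactly the candidate rows
  have hcopy : ((table.map Prod.fst).foldl
      (fun ct element => if element ∈ unvisited then ct else PySem.Dict.erase ct element)
      (PySem.Dict.mk table)).items = cand := by
    rw [pv_items_foldl_erase unvisited (table.map Prod.fst) (PySem.Dict.mk table), hitems, hcand]
    apply List.filter_congr
    intro p hp
    have : p.1 ∈ table.map Prod.fst := List.mem_map_of_mem hp
    simp [this]
  -- hence A's min over copy_table's keys is p₀.1
  have e2 : PySem.List.min? cand (fun p => pvCostT table p.1) = PySem.List.min? cand pvCost :=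
    pv_min?_congr _ _ cand (fun p hp => hlook p (List.mem_of_mem_filter hp))
  have hminA : PySem.List.min? (cand.map Prod.fst) (fun y => pvCostT table y) = some p₀.1 := by
    rw [pv_min?_map Prod.fst (fun y => pvCostT table y) cand, e2, hmin]
    rfl
  -- the looked-up cost of the winner is its own first cost
  have htarget : ∀ (d : PySem.Dict String (List Int)), d.items = cand →
      (PySem.List.pyGet? (PySem.Dict.getD d p₀.1 []) 0).getD 0 = pvCost p₀ := by
    intro d hd
    have hsub : (cand.map Prod.fst).Sublist (table.map Prod.fst) :=
      List.Sublist.map Prod.fst List.filter_sublist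
    have hndc : d.keys.Nodup := by
      show (d.items.map Prod.fst).Nodup
      rw [hd]; exact hnd.sublist hsub
    have := PySem.Dict.getD_of_mem_items d (k := p₀.1) (v := p₀.2)
      (by rw [hd]; exact hp₀_cand) hndc []
    simp [pvCost, this]
  -- B's side reduces to p₀.1
  have hB : (table.foldl
      (fun best p => if p.1 ∈ unvisited then
          match best with
          | none => some (p.1, (PySem.List.pyGet? p.2 0).getD 0)
          | some q => if (PySem.List.pyGet? p.2 0).getD 0 < q.2 then
              some (p.1, (PySem.List.pyGet? p.2 0).getD 0) else some q
        else best) (none : Option (String × Int))) = some (p₀.1, pvCost p₀) := by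
    have h1 : table.foldl
        (fun best p => if p.1 ∈ unvisited then
            match best with
            | none => some (p.1, (PySem.List.pyGet? p.2 0).getD 0)
            | some q => if (PySem.List.pyGet? p.2 0).getD 0 < q.2 then
                some (p.1, (PySem.List.pyGet? p.2 0).getD 0) else some q
          else best) (none : Option (String × Int))
        = cand.foldl pvStepB none := by
      rw [hcand, List.foldl_filter]
      apply PySem.List.foldl_congr_mem
      intro acc x _
      by_cases hx : x.1 ∈ unvisited
      · cases acc with
        | none => simp [hx, pvStepB, pvCost]
        | some q => simp [hx, pvStepB, pvCost]
      · simp [hx]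
    rw [h1, pv_foldB_none, hmin]
    rfl
  -- A's side: the rescanning loop finds p₀.1 first
  obtain ⟨l₁, l₂, hsplit, hstrict⟩ := pv_min?_first pvCost cand p₀ hmin
  have hfindc : cand.find? (fun p => decide (pvCost p = pvCost p₀)) = some p₀ := by
    rw [hsplit]; exact pv_find?_of_first pvCost l₁ l₂ p₀ hstrict
  have h2 : cand.find? (fun p => decide (pvCost p = pvCost p₀))
      = table.find? ((fun x => decide (x ∈ unvisited) && decide (pvCostT table x = pvCost p₀)) ∘ Prod.fst) := by
    rw [hcand, List.find?_filter]
    apply pv_find?_congr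
    intro p hp
    rw [Function.comp_apply, hlook p hp]
    by_cases hpu : p.1 ∈ unvisited
    · simp [hpu]
    · simp [hpu]
  have hfindA : (table.map Prod.fst).find? (fun x =>
      decide (x ∈ unvisited) && decide (pvCostT table x = pvCost p₀)) = some p₀.1 := by
    rw [List.find?_map, ← h2, hfindc]
    rfl
  -- assemble
  have hck : PySem.Dict.keys ((table.map Prod.fst).foldl
      (fun ct element => if element ∈ unvisited then ct else PySem.Dict.erase ct element)
      (PySem.Dict.mk table)) = cand.map Prod.fst := by
    show (((table.map Prod.fst).foldl _ (PySem.Dict.mk table)).items).map Prod.fst = _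
    rw [hcopy]
  have hminA' : PySem.List.min? (PySem.Dict.keys ((table.map Prod.fst).foldl
      (fun ct element => if element ∈ unvisited then ct else PySem.Dict.erase ct element)
      (PySem.Dict.mk table))) (fun y => pvCostT table y) = some p₀.1 := by
    rw [hck]; exact hminA
  have htarget' := htarget _ hcopy
  simp only [hkeys, hB, hminA', htarget', hfindA, Option.getD_some]
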